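-- pv_equiv track=rewrite | github.com/it-is-final/1457-solver | 1457_solver.py | build_round_1_map
-- ===== SOURCE A (Python) =====
-- def build_round_1_map(xor_values: set[int]):
--     checksum_map: dict[int, int] = {}
--     for xor_value in sorted(xor_values):
--         remainder = (0x10000 - (xor_value * 12)) & 0xFFFF
--         for i in range(remainder, 0xC0000, 0x10000):
--             if (i % 12) == 0 and (i // 12) in xor_values and ((i // 12) & 0x4000 == 0):
--                 checksum_map[xor_value] = i // 12
--                 break
--     return checksum_map
-- ===== SOURCE B (Python) =====
-- def build_round_1_map(xor_values: set[int]):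
--     # For each xor_value the 12-step scan in A reduces to checking the two
--     # candidates c = (-xor_value) % 0x4000 and c + 0x8000 (the ones with bit 14 clear).
--     checksum_map: dict[int, int] = {}
--     for xor_value in sorted(xor_values):
--         c = (-xor_value) % 0x4000
--         if c in xor_values:
--             checksum_map[xor_value] = c
--         elif c + 0x8000 in xor_values:
--             checksum_map[xor_value] = c + 0x8000
--     return checksum_map
-- ===== Notes on version B (the rewrite author's own statement) =====
-- stated objective: faster
-- what changed: A scans a 12-step arithmetic progression per key testing divisibility, membership and a bit mask; B solves the congruence 12*(c+xor_value) = 0 mod 0x10000 in closed form and directly checks the only two eligible candidates (-xor_value) % 0x4000 and that value + 0x8000.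
import Mathlib
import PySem

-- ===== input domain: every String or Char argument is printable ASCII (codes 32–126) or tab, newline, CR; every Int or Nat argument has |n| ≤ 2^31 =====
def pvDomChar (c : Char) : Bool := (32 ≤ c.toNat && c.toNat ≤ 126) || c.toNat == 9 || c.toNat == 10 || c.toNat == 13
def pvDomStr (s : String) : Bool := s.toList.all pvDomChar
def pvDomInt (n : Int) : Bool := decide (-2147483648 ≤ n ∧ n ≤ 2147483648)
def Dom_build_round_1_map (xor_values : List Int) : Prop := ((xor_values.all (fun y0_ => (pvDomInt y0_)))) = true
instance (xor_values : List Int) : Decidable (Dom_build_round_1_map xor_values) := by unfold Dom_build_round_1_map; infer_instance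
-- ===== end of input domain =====

-- B replaces A's 12-step progression scan per key by a direct check of the two
-- candidates (-xor_value) % 0x4000 and that value + 0x8000 (objective: alternative/faster constant factor).

-- ===== PORT A =====
def build_round_1_map (xor_values : List Int) : List (Int × Int) :=
  ((PySem.List.sorted xor_values (fun x => x) false).foldl
    (fun (checksum_map : PySem.Dict Int Int) xor_value =>
      let remainder := PySem.Int.band (65536 - xor_value * 12) 65535
      -- 'for i in range(…): if …: checksum_map[xor_value] = i // 12; break' = first i satisfying the test
      match (PySem.List.pyRange remainder 786432 65536).find? (fun i =>
          PySem.Int.mod i 12 == 0 && xor_values.contains (PySem.Int.floordiv i 12)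
            && PySem.Int.band (PySem.Int.floordiv i 12) 16384 == 0) with
      | some i => checksum_map.insert xor_value (PySem.Int.floordiv i 12)
      | none => checksum_map)
    PySem.Dict.empty).items

-- ===== PORT B =====
def build_round_1_map_alt (xor_values : List Int) : List (Int × Int) :=
  ((PySem.List.sorted xor_values (fun x => x) false).foldl
    (fun (checksum_map : PySem.Dict Int Int) xor_value =>
      let c := PySem.Int.mod (-xor_value) 16384
      if xor_values.contains c then checksum_map.insert xor_value c
      else if xor_values.contains (c + 32768) then checksum_map.insert xor_value (c + 32768)
      else checksum_map)
    PySem.Dict.empty).items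

-- ===== PRECONDITION & SPEC =====
def Spec_build_round_1_map (xor_values : List Int) (out : List (Int × Int)) : Prop := out = build_round_1_map_alt xor_values
instance (xor_values : List Int) (out : List (Int × Int)) : Decidable (Spec_build_round_1_map xor_values out) := by unfold Spec_build_round_1_map; infer_instance

-- ===== CLAIM (what is proved, stated in full; the proofs are below) =====
def Claim_equal_build_round_1_map : Prop := ∀ (xor_values : List Int), Dom_build_round_1_map xor_values → Spec_build_round_1_map xor_values (build_round_1_map xor_values)

-- ===== LEMMAS AND PROOFS =====

-- Python's  a & 0xFFFF  is  a mod 2^16, also for negative a.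
lemma band_65535 (a : Int) : PySem.Int.band a 65535 = a % 65536 := by
  rw [PySem.Int.band.eq_1]
  norm_num
  simp only [show Int.toNat 65535 = 65535 from rfl]
  by_cases h : 0 ≤ a
  · rw [if_pos h]
    have h1 := Nat.and_two_pow_sub_one_eq_mod a.toNat 16
    norm_num at h1
    rw [h1]; omega
  · rw [if_neg h]
    have h2 := Nat.and_two_pow_sub_one_eq_mod ((-a).toNat - 1) 16
    norm_num at h2
    rw [Nat.and_comm, h2]; omega

-- Python's  c & 0x4000  for 0 ≤ c reads bit 14.
lemma band_16384 (c : Int) (hc : 0 ≤ c) :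
    PySem.Int.band c 16384 = if c.toNat / 16384 % 2 = 1 then 16384 else 0 := by
  rw [PySem.Int.band_of_nonneg hc (by norm_num)]
  simp only [show Int.toNat 16384 = 16384 from rfl]
  have h := Nat.and_two_pow c.toNat 14
  have ht := Nat.testBit_eq_decide_div_mod_eq (x := c.toNat) (i := 14)
  norm_num at h ht
  rw [h, ht]
  split_ifs with hx <;> simp [hx]

-- range(remainder, 0xC0000, 0x10000) has exactly 12 elements when 0 ≤ remainder < 0x10000
lemma pyRange12 (a : Int) (h0 : 0 ≤ a) (h1 : a < 65536) :
    PySem.List.pyRange a 786432 65536 =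
      [a, a + 65536, a + 131072, a + 196608, a + 262144, a + 327680, a + 393216,
       a + 458752, a + 524288, a + 589824, a + 655360, a + 720896] := by
  rw [PySem.List.pyRange_of_pos _ _ (by norm_num : (0:Int) < 65536)]
  rw [if_pos (by omega), show ((786432 - a + 65536 - 1) / 65536).toNat = 12 by omega]
  simp [List.range_succ]

-- the inner 12-step scan, by where 12*r falls relative to the 2^16 window (three alignments)
lemma scan0 (xs : List Int) (r : Int) (hr0 : 0 ≤ r) (hr1 : r < 16384)
    (m : PySem.Dict Int Int) (xv : Int) :
    (match ([12*r, 12*r + 65536, 12*r + 131072, 12*r + 196608, 12*r + 262144, 12*r + 327680,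
        12*r + 393216, 12*r + 458752, 12*r + 524288, 12*r + 589824, 12*r + 655360, 12*r + 720896].find? (fun i =>
          PySem.Int.mod i 12 == 0 && xs.contains (PySem.Int.floordiv i 12)
            && PySem.Int.band (PySem.Int.floordiv i 12) 16384 == 0)) with
      | some i => m.insert xv (PySem.Int.floordiv i 12)
      | none => m) =
    (if xs.contains r then m.insert xv r
      else if xs.contains (r + 32768) then m.insert xv (r + 32768)
      else m) := by
  have hmod : ∀ i : Int, PySem.Int.mod i 12 = i % 12 :=
    fun i => PySem.Int.mod_eq_emod_of_pos (by norm_num)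
  have hfd : ∀ i : Int, PySem.Int.floordiv i 12 = i / 12 :=
    fun i => PySem.Int.floordiv_eq_ediv_of_pos (by norm_num)
  have hbit0 : PySem.Int.band r 16384 = 0 := by rw [band_16384 r (by omega)]; split_ifs <;> omega
  have hbit1 : PySem.Int.band (r + 16384) 16384 = 16384 := by
    rw [band_16384 _ (by omega)]; split_ifs <;> omega
  have hbit2 : PySem.Int.band (r + 32768) 16384 = 0 := by
    rw [band_16384 _ (by omega)]; split_ifs <;> omega
  have hbit3 : PySem.Int.band (r + 49152) 16384 = 16384 := by
    rw [band_16384 _ (by omega)]; split_ifs <;> omega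
  simp only [List.find?, hmod, hfd]
  norm_num
  rw [show (12*r + 196608) / 12 = r + 16384 by omega,
      show (12*r + 393216) / 12 = r + 32768 by omega, show (12*r + 589824) / 12 = r + 49152 by omega,
      hbit0, hbit1, hbit2, hbit3]
  simp only [show ((4:Int) == 0) = false from rfl, show ((8:Int) == 0) = false from rfl,
    show ((0:Int) == 0) = true from rfl, show ((16384:Int) == 0) = false from rfl,
    Bool.false_and, Bool.and_false, Bool.and_true]
  by_cases h0 : r ∈ xs <;> by_cases h1 : r + 32768 ∈ xs <;>
    simp [h0, h1, show 12 * r / 12 = r by omega, show (12*r + 393216) / 12 = r + 32768 by omega]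

lemma scan1 (xs : List Int) (r : Int) (hr0 : 5462 ≤ r) (hr1 : r < 10923)
    (m : PySem.Dict Int Int) (xv : Int) :
    (match ([12*r - 65536, 12*r - 65536 + 65536, 12*r - 65536 + 131072, 12*r - 65536 + 196608, 12*r - 65536 + 262144, 12*r - 65536 + 327680, 12*r - 65536 + 393216, 12*r - 65536 + 458752, 12*r - 65536 + 524288, 12*r - 65536 + 589824, 12*r - 65536 + 655360, 12*r - 65536 + 720896].find? (fun i =>
          PySem.Int.mod i 12 == 0 && xs.contains (PySem.Int.floordiv i 12)
            && PySem.Int.band (PySem.Int.floordiv i 12) 16384 == 0)) with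
      | some i => m.insert xv (PySem.Int.floordiv i 12)
      | none => m) =
    (if xs.contains r then m.insert xv r
      else if xs.contains (r + 32768) then m.insert xv (r + 32768)
      else m) := by
  rw [show (12*r - 65536 + 65536 : Int) = 12*r by ring,
      show (12*r - 65536 + 131072 : Int) = 12*r + 65536 by ring,
      show (12*r - 65536 + 196608 : Int) = 12*r + 131072 by ring,
      show (12*r - 65536 + 262144 : Int) = 12*r + 196608 by ring,
      show (12*r - 65536 + 327680 : Int) = 12*r + 262144 by ring,
      show (12*r - 65536 + 393216 : Int) = 12*r + 327680 by ring,
      show (12*r - 65536 + 458752 : Int) = 12*r + 393216 by ring,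
      show (12*r - 65536 + 524288 : Int) = 12*r + 458752 by ring,
      show (12*r - 65536 + 589824 : Int) = 12*r + 524288 by ring,
      show (12*r - 65536 + 655360 : Int) = 12*r + 589824 by ring,
      show (12*r - 65536 + 720896 : Int) = 12*r + 655360 by ring]
  have hmod : ∀ i : Int, PySem.Int.mod i 12 = i % 12 :=
    fun i => PySem.Int.mod_eq_emod_of_pos (by norm_num)
  have hfd : ∀ i : Int, PySem.Int.floordiv i 12 = i / 12 :=
    fun i => PySem.Int.floordiv_eq_ediv_of_pos (by norm_num)
  have hbit0 : PySem.Int.band r 16384 = 0 := by rw [band_16384 r (by omega)]; split_ifs <;> omega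
  have hbit1 : PySem.Int.band (r + 16384) 16384 = 16384 := by
    rw [band_16384 _ (by omega)]; split_ifs <;> omega
  have hbit2 : PySem.Int.band (r + 32768) 16384 = 0 := by
    rw [band_16384 _ (by omega)]; split_ifs <;> omega
  have hbit3 : PySem.Int.band (r + 49152) 16384 = 16384 := by
    rw [band_16384 _ (by omega)]; split_ifs <;> omega
  simp only [List.find?, hmod, hfd]
  norm_num
  rw [show (12*r + 196608) / 12 = r + 16384 by omega,
      show (12*r + 393216) / 12 = r + 32768 by omega, show (12*r + 589824) / 12 = r + 49152 by omega,
      hbit0, hbit1, hbit2, hbit3]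
  simp only [show ((4:Int) == 0) = false from rfl, show ((8:Int) == 0) = false from rfl,
    show ((0:Int) == 0) = true from rfl, show ((16384:Int) == 0) = false from rfl,
    Bool.false_and, Bool.and_false, Bool.and_true]
  by_cases h0 : r ∈ xs <;> by_cases h1 : r + 32768 ∈ xs <;>
    simp [h0, h1, show 12 * r / 12 = r by omega, show (12*r + 393216) / 12 = r + 32768 by omega]


lemma scan2 (xs : List Int) (r : Int) (hr0 : 10923 ≤ r) (hr1 : r < 16384)
    (m : PySem.Dict Int Int) (xv : Int) :
    (match ([12*r - 131072, 12*r - 131072 + 65536, 12*r - 131072 + 131072, 12*r - 131072 + 196608, 12*r - 131072 + 262144, 12*r - 131072 + 327680, 12*r - 131072 + 393216, 12*r - 131072 + 458752, 12*r - 131072 + 524288, 12*r - 131072 + 589824, 12*r - 131072 + 655360, 12*r - 131072 + 720896].find? (fun i =>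
          PySem.Int.mod i 12 == 0 && xs.contains (PySem.Int.floordiv i 12)
            && PySem.Int.band (PySem.Int.floordiv i 12) 16384 == 0)) with
      | some i => m.insert xv (PySem.Int.floordiv i 12)
      | none => m) =
    (if xs.contains r then m.insert xv r
      else if xs.contains (r + 32768) then m.insert xv (r + 32768)
      else m) := by
  rw [show (12*r - 131072 + 65536 : Int) = 12*r - 65536 by ring,
      show (12*r - 131072 + 131072 : Int) = 12*r by ring,
      show (12*r - 131072 + 196608 : Int) = 12*r + 65536 by ring,
      show (12*r - 131072 + 262144 : Int) = 12*r + 131072 by ring,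
      show (12*r - 131072 + 327680 : Int) = 12*r + 196608 by ring,
      show (12*r - 131072 + 393216 : Int) = 12*r + 262144 by ring,
      show (12*r - 131072 + 458752 : Int) = 12*r + 327680 by ring,
      show (12*r - 131072 + 524288 : Int) = 12*r + 393216 by ring,
      show (12*r - 131072 + 589824 : Int) = 12*r + 458752 by ring,
      show (12*r - 131072 + 655360 : Int) = 12*r + 524288 by ring,
      show (12*r - 131072 + 720896 : Int) = 12*r + 589824 by ring]
  have hmod : ∀ i : Int, PySem.Int.mod i 12 = i % 12 :=
    fun i => PySem.Int.mod_eq_emod_of_pos (by norm_num)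
  have hfd : ∀ i : Int, PySem.Int.floordiv i 12 = i / 12 :=
    fun i => PySem.Int.floordiv_eq_ediv_of_pos (by norm_num)
  have hbit0 : PySem.Int.band r 16384 = 0 := by rw [band_16384 r (by omega)]; split_ifs <;> omega
  have hbit1 : PySem.Int.band (r + 16384) 16384 = 16384 := by
    rw [band_16384 _ (by omega)]; split_ifs <;> omega
  have hbit2 : PySem.Int.band (r + 32768) 16384 = 0 := by
    rw [band_16384 _ (by omega)]; split_ifs <;> omega
  have hbit3 : PySem.Int.band (r + 49152) 16384 = 16384 := by
    rw [band_16384 _ (by omega)]; split_ifs <;> omega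
  simp only [List.find?, hmod, hfd]
  norm_num
  rw [show (12*r + 196608) / 12 = r + 16384 by omega,
      show (12*r + 393216) / 12 = r + 32768 by omega, show (12*r + 589824) / 12 = r + 49152 by omega,
      hbit0, hbit1, hbit2, hbit3]
  simp only [show ((4:Int) == 0) = false from rfl, show ((8:Int) == 0) = false from rfl,
    show ((0:Int) == 0) = true from rfl, show ((16384:Int) == 0) = false from rfl,
    Bool.false_and, Bool.and_false, Bool.and_true]
  by_cases h0 : r ∈ xs <;> by_cases h1 : r + 32768 ∈ xs <;>
    simp [h0, h1, show 12 * r / 12 = r by omega, show (12*r + 393216) / 12 = r + 32768 by omega]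


theorem build_round_1_map_spec' (xs : List Int) :
    build_round_1_map xs = build_round_1_map_alt xs := by
  unfold build_round_1_map build_round_1_map_alt
  congr 1
  apply List.foldl_ext
  intro m xv _
  show (match (PySem.List.pyRange (PySem.Int.band (65536 - xv * 12) 65535) 786432 65536).find? (fun i =>
          PySem.Int.mod i 12 == 0 && xs.contains (PySem.Int.floordiv i 12)
            && PySem.Int.band (PySem.Int.floordiv i 12) 16384 == 0) with
      | some i => m.insert xv (PySem.Int.floordiv i 12)
      | none => m) =
    (if xs.contains (PySem.Int.mod (-xv) 16384) then m.insert xv (PySem.Int.mod (-xv) 16384)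
      else if xs.contains (PySem.Int.mod (-xv) 16384 + 32768) then
        m.insert xv (PySem.Int.mod (-xv) 16384 + 32768)
      else m)
  have hc : PySem.Int.mod (-xv) 16384 = (-xv) % 16384 := PySem.Int.mod_eq_emod_of_pos (by norm_num)
  have hr0 : (0:Int) ≤ (-xv) % 16384 := Int.emod_nonneg _ (by norm_num)
  have hr1 : (-xv) % 16384 < 16384 := Int.emod_lt_of_pos _ (by norm_num)
  have hrem : PySem.Int.band (65536 - xv * 12) 65535 = (12 * ((-xv) % 16384)) % 65536 := by
    rw [band_65535]; omega
  rw [hc, hrem]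
  set r := (-xv) % 16384 with hrdef
  rcases (by omega : (12 * r) % 65536 = 12*r ∨ (12*r) % 65536 = 12*r - 65536 ∨
      (12*r) % 65536 = 12*r - 131072) with h | h | h <;> rw [h, pyRange12 _ (by omega) (by omega)]
  · exact scan0 xs r hr0 hr1 m xv
  · exact scan1 xs r (by omega) (by omega) m xv
  · exact scan2 xs r (by omega) (by omega) m xv

-- ===== VERDICT (by name: the statement is the Claim_ definition above) =====
theorem build_round_1_map_spec : Claim_equal_build_round_1_map := by
  intro xs _
  unfold Spec_build_round_1_map
  exact build_round_1_map_spec' xs
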